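-- pv_equiv track=rewrite | github.com/eulucasbotaro-2up-business-stack/terapeutas-agent | tools/retagueamento_chunks.py | match_arquivo
-- ===== SOURCE A (Python) =====
-- MAPEAMENTO = {
--     # PDFs principais (por nome exato ou prefixo)
--     "DNA.pdf": (3, ["dna", "dna_alquimico", "7_cores", "chakra"]),
--     "ASTROLOGIA.pdf": (5, ["astrologia", "mapa_astral"]),
--     "MATRIX E TRAUMAS.pdf": (2, ["matrix", "traumas", "heranca"]),
--     "QUATRO ELEMENTOS E PLETORA.pdf": (2, ["4_elementos", "pletora"]),
--     "COMO USAR OS PROTOCOLOS.pdf": (6, ["protocolos", "florais", "tratamento"]),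
--     "PERGUNTAS FREQUENTES": (1, ["fundamentos", "perguntas"]),
--     "Material de Pesquisa.pdf": (1, ["fundamentos", "pesquisa"]),
--     "PESQUISA AVANCADA.pdf": (1, ["fundamentos", "pesquisa"]),
--     "PESQUISA AVAN": (1, ["fundamentos", "pesquisa"]),
--     "APROFUNDAMENTO NOS 7 CHACKRAS.pdf": (5, ["chakra", "7_cores"]),
--     "M1.Apostila": (1, ["fundamentos", "modulo1"]),
--     "M2.Apostila": (2, ["elementos", "modulo2"]),
--     "M3.Apostila": (3, ["dna", "modulo3"]),
--     "M4.Apostila": (4, ["transmutacao", "modulo4", "avancado"]),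
--     "O Fluxus": (5, ["fluxus", "astrologia"]),
--     "REFERENCIA DO DNA": (3, ["dna", "dna_referencia"]),
--     "Miasmas.pdf": (2, ["miasma", "matrix_heranca"]),
--     "Apostila Trindade e Tartarus": (4, ["transmutacao", "nigredo", "trindade"]),
--     "Apostila Rubedo": (4, ["transmutacao", "rubedo"]),
--     "BIORRITIMOS.pdf": (5, ["biorritmo", "astro_ciclo"]),
--     "SIGNIFICADO KITE PRIMUS": (6, ["protocolo", "kit_primus"]),
--     "A Aura das flores": (6, ["floral", "floral_aura"]),
--     # YouTube
--     "YouTube - ": (1, ["youtube", "joel_fala"]),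
--     # NotebookLM
--     "NotebookLM - Como Joel Diagnostica": (1, ["notebooklm", "referencia", "diagnostico"]),
--     "NotebookLM - Mapeamento Diagnostico Alquimico": (1, ["notebooklm", "referencia", "diagnostico"]),
--     "NotebookLM - Matrix e Heranca Ancestral": (2, ["notebooklm", "referencia", "matrix", "heranca"]),
--     "NotebookLM - Tabela Sintomas e Causas Alquimicas": (1, ["notebooklm", "referencia", "diagnostico"]),
--     "NotebookLM - Tipos de Florais Alquimicos": (6, ["notebooklm", "referencia", "floral"]),
--     "NotebookLM - Voz e Estilo do Joel": (1, ["notebooklm", "referencia"]),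
-- }
--
-- def match_arquivo(nome):
--     """Encontra o mapeamento correto para um nome de arquivo."""
--     if not nome:
--         return None
--     # Tenta match exato primeiro
--     if nome in MAPEAMENTO:
--         return MAPEAMENTO[nome]
--     # Tenta match por prefixo (do mais especifico pro mais generico)
--     for pattern, value in sorted(MAPEAMENTO.items(), key=lambda x: -len(x[0])):
--         if nome.startswith(pattern):
--             return value
--     return None
-- ===== SOURCE B (Python) =====
-- _LINHAS = [
--     "DNA.pdf|3|dna,dna_alquimico,7_cores,chakra",
--     "ASTROLOGIA.pdf|5|astrologia,mapa_astral",
--     "MATRIX E TRAUMAS.pdf|2|matrix,traumas,heranca",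
--     "QUATRO ELEMENTOS E PLETORA.pdf|2|4_elementos,pletora",
--     "COMO USAR OS PROTOCOLOS.pdf|6|protocolos,florais,tratamento",
--     "PERGUNTAS FREQUENTES|1|fundamentos,perguntas",
--     "Material de Pesquisa.pdf|1|fundamentos,pesquisa",
--     "PESQUISA AVANCADA.pdf|1|fundamentos,pesquisa",
--     "PESQUISA AVAN|1|fundamentos,pesquisa",
--     "APROFUNDAMENTO NOS 7 CHACKRAS.pdf|5|chakra,7_cores",
--     "M1.Apostila|1|fundamentos,modulo1",
--     "M2.Apostila|2|elementos,modulo2",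
--     "M3.Apostila|3|dna,modulo3",
--     "M4.Apostila|4|transmutacao,modulo4,avancado",
--     "O Fluxus|5|fluxus,astrologia",
--     "REFERENCIA DO DNA|3|dna,dna_referencia",
--     "Miasmas.pdf|2|miasma,matrix_heranca",
--     "Apostila Trindade e Tartarus|4|transmutacao,nigredo,trindade",
--     "Apostila Rubedo|4|transmutacao,rubedo",
--     "BIORRITIMOS.pdf|5|biorritmo,astro_ciclo",
--     "SIGNIFICADO KITE PRIMUS|6|protocolo,kit_primus",
--     "A Aura das flores|6|floral,floral_aura",
--     "YouTube - |1|youtube,joel_fala",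
--     "NotebookLM - Como Joel Diagnostica|1|notebooklm,referencia,diagnostico",
--     "NotebookLM - Mapeamento Diagnostico Alquimico|1|notebooklm,referencia,diagnostico",
--     "NotebookLM - Matrix e Heranca Ancestral|2|notebooklm,referencia,matrix,heranca",
--     "NotebookLM - Tabela Sintomas e Causas Alquimicas|1|notebooklm,referencia,diagnostico",
--     "NotebookLM - Tipos de Florais Alquimicos|6|notebooklm,referencia,floral",
--     "NotebookLM - Voz e Estilo do Joel|1|notebooklm,referencia",
-- ]
--
-- # Compact pattern table parsed once at import: "pattern|categoria|tag,tag,..."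
-- _TABELA = []
-- for _linha in _LINHAS:
--     _pat, _cat, _tags = _linha.split("|")
--     _TABELA.append((_pat, (int(_cat), _tags.split(","))))
--
--
-- def match_arquivo(nome):
--     """Encontra o mapeamento correto para um nome de arquivo."""
--     if not nome:
--         return None
--     # Single unsorted pass keeping the longest matching prefix; an exact match
--     # is the longest possible prefix, so it needs no separate lookup, and the
--     # strict '>' keeps the first entry among equal-length matches.
--     best_value = None
--     best_len = -1
--     for pattern, value in _TABELA:
--         if nome.startswith(pattern) and len(pattern) > best_len:
--             best_value, best_len = value, len(pattern)
--     return best_value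
-- ===== Notes on version B (the rewrite author's own statement) =====
-- stated objective: alternative
-- what changed: Replaces the dict with exact-lookup then per-call sort of all items and first-prefix-match by a compact pipe-delimited line table parsed once at import plus a single unsorted pass that keeps the longest matching prefix (the exact match is subsumed as the longest possible prefix).
import Mathlib
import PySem

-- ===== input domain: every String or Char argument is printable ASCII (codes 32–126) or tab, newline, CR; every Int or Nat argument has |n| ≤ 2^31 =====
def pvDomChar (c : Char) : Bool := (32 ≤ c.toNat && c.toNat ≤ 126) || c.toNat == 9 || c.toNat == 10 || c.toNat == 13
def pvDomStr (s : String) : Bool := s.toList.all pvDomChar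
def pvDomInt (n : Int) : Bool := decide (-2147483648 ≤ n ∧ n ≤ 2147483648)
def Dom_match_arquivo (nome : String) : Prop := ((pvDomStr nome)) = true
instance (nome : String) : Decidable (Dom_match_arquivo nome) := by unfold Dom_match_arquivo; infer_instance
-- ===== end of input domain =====

-- B replaces A's dict + exact-lookup + per-call sort + first-match scheme with a compact
-- pipe-delimited table parsed once and a single unsorted pass keeping the longest matching
-- prefix (objective: alternative).

-- ===== PORT A =====
-- MAPEAMENTO (A's module-level dict literal)
def pvMapList : List (String × (Int × List String)) := [
  ("DNA.pdf", (3, ["dna", "dna_alquimico", "7_cores", "chakra"])),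
  ("ASTROLOGIA.pdf", (5, ["astrologia", "mapa_astral"])),
  ("MATRIX E TRAUMAS.pdf", (2, ["matrix", "traumas", "heranca"])),
  ("QUATRO ELEMENTOS E PLETORA.pdf", (2, ["4_elementos", "pletora"])),
  ("COMO USAR OS PROTOCOLOS.pdf", (6, ["protocolos", "florais", "tratamento"])),
  ("PERGUNTAS FREQUENTES", (1, ["fundamentos", "perguntas"])),
  ("Material de Pesquisa.pdf", (1, ["fundamentos", "pesquisa"])),
  ("PESQUISA AVANCADA.pdf", (1, ["fundamentos", "pesquisa"])),
  ("PESQUISA AVAN", (1, ["fundamentos", "pesquisa"])),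
  ("APROFUNDAMENTO NOS 7 CHACKRAS.pdf", (5, ["chakra", "7_cores"])),
  ("M1.Apostila", (1, ["fundamentos", "modulo1"])),
  ("M2.Apostila", (2, ["elementos", "modulo2"])),
  ("M3.Apostila", (3, ["dna", "modulo3"])),
  ("M4.Apostila", (4, ["transmutacao", "modulo4", "avancado"])),
  ("O Fluxus", (5, ["fluxus", "astrologia"])),
  ("REFERENCIA DO DNA", (3, ["dna", "dna_referencia"])),
  ("Miasmas.pdf", (2, ["miasma", "matrix_heranca"])),
  ("Apostila Trindade e Tartarus", (4, ["transmutacao", "nigredo", "trindade"])),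
  ("Apostila Rubedo", (4, ["transmutacao", "rubedo"])),
  ("BIORRITIMOS.pdf", (5, ["biorritmo", "astro_ciclo"])),
  ("SIGNIFICADO KITE PRIMUS", (6, ["protocolo", "kit_primus"])),
  ("A Aura das flores", (6, ["floral", "floral_aura"])),
  ("YouTube - ", (1, ["youtube", "joel_fala"])),
  ("NotebookLM - Como Joel Diagnostica", (1, ["notebooklm", "referencia", "diagnostico"])),
  ("NotebookLM - Mapeamento Diagnostico Alquimico", (1, ["notebooklm", "referencia", "diagnostico"])),
  ("NotebookLM - Matrix e Heranca Ancestral", (2, ["notebooklm", "referencia", "matrix", "heranca"])),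
  ("NotebookLM - Tabela Sintomas e Causas Alquimicas", (1, ["notebooklm", "referencia", "diagnostico"])),
  ("NotebookLM - Tipos de Florais Alquimicos", (6, ["notebooklm", "referencia", "floral"])),
  ("NotebookLM - Voz e Estilo do Joel", (1, ["notebooklm", "referencia"]))]

def pvMapeamento : PySem.Dict String (Int × List String) := PySem.Dict.ofList pvMapList

-- A's prefix loop: first item of the length-sorted list whose pattern is a prefix of nome
def pvALoop (nome : String) : List (String × (Int × List String)) → Option (Int × List String)
  | [] => none
  | (p, v) :: rest => if PySem.Str.startswith nome p then some v else pvALoop nome rest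

def match_arquivo (nome : String) : Option (Int × List String) :=
  if nome = "" then none
  else if pvMapeamento.contains nome then pvMapeamento.get? nome
  else pvALoop nome
    (PySem.List.sorted pvMapeamento.items (fun x => -(PySem.Str.len x.1 : Int)) false)

-- ===== PORT B =====
-- B's module-level compact table: one "pattern|categoria|tag,tag,..." entry per line
def pvLinhas : List String := [
  "DNA.pdf|3|dna,dna_alquimico,7_cores,chakra",
  "ASTROLOGIA.pdf|5|astrologia,mapa_astral",
  "MATRIX E TRAUMAS.pdf|2|matrix,traumas,heranca",
  "QUATRO ELEMENTOS E PLETORA.pdf|2|4_elementos,pletora",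
  "COMO USAR OS PROTOCOLOS.pdf|6|protocolos,florais,tratamento",
  "PERGUNTAS FREQUENTES|1|fundamentos,perguntas",
  "Material de Pesquisa.pdf|1|fundamentos,pesquisa",
  "PESQUISA AVANCADA.pdf|1|fundamentos,pesquisa",
  "PESQUISA AVAN|1|fundamentos,pesquisa",
  "APROFUNDAMENTO NOS 7 CHACKRAS.pdf|5|chakra,7_cores",
  "M1.Apostila|1|fundamentos,modulo1",
  "M2.Apostila|2|elementos,modulo2",
  "M3.Apostila|3|dna,modulo3",
  "M4.Apostila|4|transmutacao,modulo4,avancado",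
  "O Fluxus|5|fluxus,astrologia",
  "REFERENCIA DO DNA|3|dna,dna_referencia",
  "Miasmas.pdf|2|miasma,matrix_heranca",
  "Apostila Trindade e Tartarus|4|transmutacao,nigredo,trindade",
  "Apostila Rubedo|4|transmutacao,rubedo",
  "BIORRITIMOS.pdf|5|biorritmo,astro_ciclo",
  "SIGNIFICADO KITE PRIMUS|6|protocolo,kit_primus",
  "A Aura das flores|6|floral,floral_aura",
  "YouTube - |1|youtube,joel_fala",
  "NotebookLM - Como Joel Diagnostica|1|notebooklm,referencia,diagnostico",
  "NotebookLM - Mapeamento Diagnostico Alquimico|1|notebooklm,referencia,diagnostico",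
  "NotebookLM - Matrix e Heranca Ancestral|2|notebooklm,referencia,matrix,heranca",
  "NotebookLM - Tabela Sintomas e Causas Alquimicas|1|notebooklm,referencia,diagnostico",
  "NotebookLM - Tipos de Florais Alquimicos|6|notebooklm,referencia,floral",
  "NotebookLM - Voz e Estilo do Joel|1|notebooklm,referencia"]

-- one entry of the table; Python's 3-way unpack / int() raise on a malformed line,
-- which the constant table never has — ported as Option (none exactly where Python raises)
def pvParseLinha (linha : String) : Option (String × (Int × List String)) :=
  match PySem.Str.split? linha "|" with
  | some [pat, cat, tags] =>
      match PySem.Int.ofStr? cat, PySem.Str.split? tags "," with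
      | some n, some ts => some (pat, (n, ts))
      | _, _ => none
  | _ => none

def pvTabela : List (String × (Int × List String)) :=
  pvLinhas.filterMap pvParseLinha

-- one step of B's single pass: keep the longest matching prefix so far
def pvBStep (nome : String) (acc : Option (Int × List String) × Int)
    (pv : String × (Int × List String)) : Option (Int × List String) × Int :=
  if PySem.Str.startswith nome pv.1 ∧ (PySem.Str.len pv.1 : Int) > acc.2
  then (some pv.2, (PySem.Str.len pv.1 : Int)) else acc

def match_arquivo_alt (nome : String) : Option (Int × List String) :=
  if nome = "" then none
  else (pvTabela.foldl (pvBStep nome) (none, -1)).1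

-- ===== PRECONDITION & SPEC =====
def Spec_match_arquivo (nome : String) (out : Option (Int × List String)) : Prop := out = match_arquivo_alt nome
instance (nome : String) (out : Option (Int × List String)) : Decidable (Spec_match_arquivo nome out) := by unfold Spec_match_arquivo; infer_instance

-- ===== CLAIM (what is proved, stated in full; the proofs are below) =====
def Claim_equal_match_arquivo : Prop := ∀ (nome : String), Dom_match_arquivo nome → Spec_match_arquivo nome (match_arquivo nome)

-- ===== LEMMAS AND PROOFS =====

-- B's parsed table is exactly A's dict literal
set_option maxRecDepth 2000000 in
set_option maxHeartbeats 2000000 in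
theorem pv_tabela_eq : pvTabela = pvMapList := by decide

theorem pv_sw_iff (nome p : String) :
    PySem.Str.startswith nome p = true ↔ p.toList <+: nome.toList := by
  rw [PySem.Str.startswith_eq, PySem.Chars.startswith_iff]

theorem pv_sw_eq_of_len_eq {nome p q : String}
    (hp : PySem.Str.startswith nome p = true) (hq : PySem.Str.startswith nome q = true)
    (hlen : PySem.Str.len p = PySem.Str.len q) : p = q := by
  rw [pv_sw_iff] at hp hq
  have hl : p.toList.length = q.toList.length := by
    simpa [PySem.Str.len_eq, PySem.Chars.len_eq] using hlen
  apply String.toList_inj.mp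
  rcases List.prefix_or_prefix_of_prefix hp hq with h'|h'
  · exact h'.eq_of_length hl
  · exact (h'.eq_of_length hl.symm).symm

theorem pv_fold_const (nome : String) (m : List (String × (Int × List String)))
    (acc : Option (Int × List String) × Int)
    (h : ∀ x ∈ m, PySem.Str.startswith nome x.1 = true → (PySem.Str.len x.1 : Int) ≤ acc.2) :
    m.foldl (pvBStep nome) acc = acc := by
  induction m with
  | nil => rfl
  | cons hd tl ih =>
    have hstep : pvBStep nome acc hd = acc := by
      unfold pvBStep
      rw [if_neg]
      rintro ⟨hsw, hgt⟩
      exact absurd (h hd (by simp) hsw) (by omega)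
    simp only [List.foldl_cons, hstep]
    exact ih fun x hx => h x (by simp [hx])

theorem pv_sw_len_le {nome p : String} (h : PySem.Str.startswith nome p = true) :
    (PySem.Str.len p : Int) ≤ (PySem.Str.len nome : Int) := by
  have := ((pv_sw_iff nome p).mp h).length_le
  simp [PySem.Str.len_eq]
  exact_mod_cast this

theorem pv_sw_self (nome : String) : PySem.Str.startswith nome nome = true :=
  (pv_sw_iff nome nome).mpr List.prefix_rfl

theorem pv_sw_len_lt {nome p : String} (h : PySem.Str.startswith nome p = true)
    (hne : p ≠ nome) : (PySem.Str.len p : Int) < (PySem.Str.len nome : Int) := by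
  rcases lt_or_eq_of_le (pv_sw_len_le h) with h'|h'
  · exact h'
  · exact absurd (pv_sw_eq_of_len_eq h (pv_sw_self nome) (by exact_mod_cast h')) hne

theorem pv_fold_get (nome : String) (m : List (String × (Int × List String)))
    (v : Int × List String) (acc : Option (Int × List String) × Int)
    (hg : (PySem.Dict.mk m).get? nome = some v) (hacc : acc.2 < (PySem.Str.len nome : Int)) :
    m.foldl (pvBStep nome) acc = (some v, (PySem.Str.len nome : Int)) := by
  induction m generalizing acc with
  | nil => simp [PySem.Dict.get?] at hg
  | cons hd tl ih =>
    obtain ⟨p, w⟩ := hd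
    rw [PySem.Dict.get?_mk_cons] at hg
    by_cases hp : p = nome
    · rw [if_pos (by simpa using hp)] at hg
      obtain rfl : w = v := by simpa using hg
      have hstep : pvBStep nome acc (p, w) = (some w, (PySem.Str.len nome : Int)) := by
        unfold pvBStep
        rw [hp, if_pos ⟨pv_sw_self nome, by omega⟩]
      rw [List.foldl_cons, hstep]
      exact pv_fold_const nome tl _ (fun x _ hx => pv_sw_len_le hx)
    · rw [if_neg (by simpa using fun h => hp h)] at hg
      rw [List.foldl_cons]
      unfold pvBStep
      split_ifs with hc
      · exact ih _ hg (by simpa using pv_sw_len_lt hc.1 hp)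
      · exact ih _ hg hacc

theorem pv_fold_sorted (nome : String) (s : List (String × (Int × List String)))
    (hs : s.Pairwise (fun a b => (PySem.Str.len b.1 : Int) ≤ (PySem.Str.len a.1 : Int))) :
    (s.foldl (pvBStep nome) (none, -1)).1 = pvALoop nome s := by
  induction s with
  | nil => rfl
  | cons hd tl ih =>
    obtain ⟨p, w⟩ := hd
    rw [List.pairwise_cons] at hs
    by_cases hsw : PySem.Str.startswith nome p = true
    · have hstep : pvBStep nome (none, -1) (p, w) = (some w, (PySem.Str.len p : Int)) := by
        unfold pvBStep
        rw [if_pos ⟨hsw, by simp [PySem.Str.len_eq]; omega⟩]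
      rw [List.foldl_cons, hstep, pv_fold_const nome tl _ (fun x hx _ => hs.1 x hx)]
      simp only [pvALoop]
      rw [if_pos hsw]
    · have hstep : pvBStep nome (none, -1) (p, w) = (none, -1) := by
        unfold pvBStep
        rw [if_neg (fun h => hsw h.1)]
      rw [List.foldl_cons, hstep, ih hs.2]
      simp only [pvALoop]
      rw [if_neg hsw]

theorem pv_step_comm (nome : String) (x y : String × (Int × List String))
    (hxy : x.1 = y.1 → x = y) (acc : Option (Int × List String) × Int) :
    pvBStep nome (pvBStep nome acc x) y = pvBStep nome (pvBStep nome acc y) x := by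
  by_cases hx : PySem.Str.startswith nome x.1 = true
  · by_cases hy : PySem.Str.startswith nome y.1 = true
    · by_cases hk : x.1 = y.1
      · rw [hxy hk]
      · have hne : (PySem.Str.len x.1 : Int) ≠ (PySem.Str.len y.1 : Int) := by
          intro h
          exact hk (pv_sw_eq_of_len_eq hx hy (by exact_mod_cast h))
        unfold pvBStep
        split_ifs <;> simp_all <;> omega
    · unfold pvBStep
      split_ifs <;> simp_all
  · unfold pvBStep
    split_ifs <;> simp_all

set_option maxRecDepth 2000000 in
theorem pv_nodup_keys : (pvMapList.map Prod.fst).Nodup := by decide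

theorem pv_distinct_keys : ∀ x ∈ pvMapList, ∀ y ∈ pvMapList, x.1 = y.1 → x = y :=
  List.inj_on_of_nodup_map pv_nodup_keys

set_option maxRecDepth 2000000 in
theorem pv_items : pvMapeamento.items = pvMapList := rfl

-- ===== VERDICT (by name: the statement is the Claim_ definition above) =====
theorem match_arquivo_spec : Claim_equal_match_arquivo := by
  intro nome _
  unfold Spec_match_arquivo match_arquivo match_arquivo_alt
  rw [pv_tabela_eq]
  by_cases h0 : nome = ""
  · rw [if_pos h0, if_pos h0]
  · rw [if_neg h0, if_neg h0]
    by_cases hc : pvMapeamento.contains nome = true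
    · rw [if_pos hc]
      have hsome : (pvMapeamento.get? nome).isSome := by
        rw [← PySem.Dict.contains_eq_isSome_get?]; exact hc
      obtain ⟨v, hv⟩ := Option.isSome_iff_exists.mp hsome
      have hv' : (PySem.Dict.mk pvMapList).get? nome = some v := hv
      rw [hv,
        pv_fold_get nome pvMapList v (none, -1) hv' (by simp [PySem.Str.len_eq]; omega)]
    · rw [if_neg hc, pv_items]
      have hperm := PySem.List.sorted_perm pvMapList (fun x => -(PySem.Str.len x.1 : Int)) false
      have hcomm : ∀ x ∈ PySem.List.sorted pvMapList (fun x => -(PySem.Str.len x.1 : Int)) false,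
          ∀ y ∈ PySem.List.sorted pvMapList (fun x => -(PySem.Str.len x.1 : Int)) false,
          ∀ z, pvBStep nome (pvBStep nome z x) y = pvBStep nome (pvBStep nome z y) x := by
        intro x hx y hy z
        exact pv_step_comm nome x y
          (pv_distinct_keys x ((PySem.List.mem_sorted _ _ _ _).mp hx) y ((PySem.List.mem_sorted _ _ _ _).mp hy)) z
      rw [← List.Perm.foldl_eq' hperm hcomm (none, -1)]
      refine (pv_fold_sorted nome _ ?_).symm
      exact (PySem.List.sorted_pairwise pvMapList (fun x => -(PySem.Str.len x.1 : Int))).imp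
        (fun h => by omega)
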